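-- pv_equiv track=rewrite | github.com/AdithyaK243/AlgosTask3 | Task3-1.py | convertToSingle
-- ===== SOURCE A (Python) =====
-- def convertToSingle(num):
--     total = 0
--     noOfDigits = 0
--     tempNum = 0
--     while num != 0:
--         tempNum = num % 10
--         total += tempNum
--         num = num // 10
--         noOfDigits += 1
--
--     if total > 9:
--         return 1 + convertToSingle(total)
--     else:
--         return 1
-- ===== SOURCE B (Python) =====
-- def convertToSingle(num):
--     def digitSum(n):
--         if n < 10:
--             return n
--         return n % 10 + digitSum(n // 10)
--
--     count = 0
--     while True:
--         total = digitSum(num)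
--         count += 1
--         if total <= 9:
--             return count
--         num = total
-- ===== Notes on version B (the rewrite author's own statement) =====
-- stated objective: simpler
-- what changed: Replaces A's non-tail outer recursion (one plus recursive call) and accumulator digit-sum while-loop with an iterative outer loop carrying a round counter and a direct recursive digit-sum helper; Pre_ excludes negative num, on which A's while loop never terminates.
import Mathlib
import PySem

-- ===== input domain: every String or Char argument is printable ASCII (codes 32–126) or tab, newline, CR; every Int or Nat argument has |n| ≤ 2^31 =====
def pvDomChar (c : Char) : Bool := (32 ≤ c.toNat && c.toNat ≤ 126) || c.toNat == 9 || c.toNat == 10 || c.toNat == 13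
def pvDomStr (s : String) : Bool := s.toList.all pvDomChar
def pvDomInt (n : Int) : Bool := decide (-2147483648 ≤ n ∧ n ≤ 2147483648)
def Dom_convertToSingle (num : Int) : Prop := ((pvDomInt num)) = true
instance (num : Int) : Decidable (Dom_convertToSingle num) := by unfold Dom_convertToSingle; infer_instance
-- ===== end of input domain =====

-- B replaces A's non-tail outer recursion (1 + recursive call) and accumulator digit-sum
-- while-loop with an iterative outer loop carrying a round counter and a direct recursive
-- digit-sum helper (objective: simpler). Pre_ excludes num < 0, where Python A loops forever.

-- strong induction on an Int's toNat measure (used by the proofs and cited for termination facts)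
theorem pvIntStrongInd (P : Int → Prop)
    (h : ∀ n : Int, (∀ m : Int, m.toNat < n.toNat → P m) → P n) (n : Int) : P n := by
  have hk : ∀ k : Nat, ∀ m : Int, m.toNat ≤ k → P m := by
    intro k
    induction k with
    | zero => intro m hm; exact h m (by omega)
    | succ k ih => intro m hm; exact h m (fun m' hm' => ih m' (by omega))
  exact hk n.toNat n le_rfl

-- termination helper for both ports (cited in decreasing_by)
theorem pvFloordiv10_toNat_lt (n : Int) (h : 0 < n) :
    (PySem.Int.floordiv n 10).toNat < n.toNat := by
  rw [PySem.Int.floordiv_eq_ediv_of_pos (by omega)]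
  omega

-- ===== PORT A =====
-- inner `while num != 0:`; the guard `num ≤ 0` (instead of `num = 0`) only makes the
-- recursion total: for num ≥ 0 (all of Pre_) it is exactly Python's exit condition.
-- noOfDigits and tempNum are carried literally even though noOfDigits is dead in A.
def convertToSingleLoop (num total noOfDigits : Int) : Int :=
  if num ≤ 0 then total
  else
    let tempNum := PySem.Int.mod num 10
    convertToSingleLoop (PySem.Int.floordiv num 10) (total + tempNum) (noOfDigits + 1)
termination_by num.toNat
decreasing_by exact pvFloordiv10_toNat_lt _ (by omega)

-- unfolding equations for the loop (cited by convertToSingle's decreasing_by)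
theorem convertToSingleLoop_nonpos (num total noOfDigits : Int) (h : num ≤ 0) :
    convertToSingleLoop num total noOfDigits = total := by
  rw [convertToSingleLoop]; simp [h]

theorem convertToSingleLoop_pos (num total noOfDigits : Int) (h : 0 < num) :
    convertToSingleLoop num total noOfDigits =
      convertToSingleLoop (PySem.Int.floordiv num 10) (total + PySem.Int.mod num 10) (noOfDigits + 1) := by
  rw [convertToSingleLoop]; simp [show ¬ num ≤ 0 by omega]

-- total ≤ num for 0 ≤ num, strictly when 10 ≤ num: needed only for termination
theorem convertToSingleLoop_le (num : Int) (h : 0 ≤ num) : ∀ total noOfDigits : Int,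
    convertToSingleLoop num total noOfDigits ≤ total + num ∧
      (10 ≤ num → convertToSingleLoop num total noOfDigits < total + num) := by
  induction num using pvIntStrongInd with
  | h n ih =>
    intro total noOfDigits
    by_cases h0 : n ≤ 0
    · rw [convertToSingleLoop_nonpos _ _ _ h0]
      omega
    · rw [convertToSingleLoop_pos _ _ _ (by omega)]
      have h10 : PySem.Int.floordiv n 10 = n / 10 :=
        PySem.Int.floordiv_eq_ediv_of_pos (by omega)
      have hm : PySem.Int.mod n 10 = n % 10 :=
        PySem.Int.mod_eq_emod_of_pos (by omega)
      have := ih (PySem.Int.floordiv n 10) (by rw [h10]; omega) (by rw [h10]; omega)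
        (total + PySem.Int.mod n 10) (noOfDigits + 1)
      rw [h10, hm] at this ⊢
      omega

def convertToSingle (num : Int) : Int :=
  let total := convertToSingleLoop num 0 0
  if 9 < total then 1 + convertToSingle total
  else 1
termination_by num.toNat
decreasing_by
  rename_i h
  have h' : 9 < convertToSingleLoop num 0 0 := h
  by_cases h0 : num ≤ 0
  · rw [convertToSingleLoop_nonpos _ _ _ h0] at h'; omega
  · have hb := convertToSingleLoop_le num (by omega) 0 0
    have h10 : 10 ≤ num := by by_contra hc; omega
    have := hb.2 h10
    omega

-- ===== PORT B =====
def digitSumB (n : Int) : Int :=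
  if n < 10 then n
  else PySem.Int.mod n 10 + digitSumB (PySem.Int.floordiv n 10)
termination_by n.toNat
decreasing_by exact pvFloordiv10_toNat_lt _ (by omega)

theorem digitSumB_small (n : Int) (h : n < 10) : digitSumB n = n := by
  rw [digitSumB]; simp [h]

theorem digitSumB_big (n : Int) (h : 10 ≤ n) :
    digitSumB n = PySem.Int.mod n 10 + digitSumB (PySem.Int.floordiv n 10) := by
  rw [digitSumB]; simp [show ¬ n < 10 by omega]

-- bounds for termination of the outer loop
theorem digitSumB_le (n : Int) : digitSumB n ≤ n ∧ (10 ≤ n → digitSumB n < n) := by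
  induction n using pvIntStrongInd with
  | h n ih =>
    by_cases hlt : n < 10
    · rw [digitSumB_small _ hlt]; omega
    · rw [digitSumB_big _ (by omega)]
      have h10 : PySem.Int.floordiv n 10 = n / 10 :=
        PySem.Int.floordiv_eq_ediv_of_pos (by omega)
      have hm : PySem.Int.mod n 10 = n % 10 :=
        PySem.Int.mod_eq_emod_of_pos (by omega)
      have := ih (PySem.Int.floordiv n 10) (by rw [h10]; omega)
      rw [h10] at this
      rw [h10, hm]
      omega

def convertToSingleAltLoop (num count : Int) : Int :=
  let total := digitSumB num
  let count := count + 1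
  if total ≤ 9 then count
  else convertToSingleAltLoop total count
termination_by num.toNat
decreasing_by
  rename_i h
  have h' : ¬ digitSumB num ≤ 9 := h
  have hb := digitSumB_le num
  have h10 : 10 ≤ num := by
    by_contra hc
    rw [digitSumB_small _ (by omega)] at h'
    omega
  have := hb.2 h10
  show (digitSumB num).toNat < num.toNat
  omega

def convertToSingle_alt (num : Int) : Int :=
  convertToSingleAltLoop num 0

-- ===== PRECONDITION & SPEC =====
-- On num < 0 the Python A never terminates (num // 10 stabilises at -1, not 0), so A
-- returns exactly on 0 ≤ num.
def Pre_convertToSingle (num : Int) : Prop := 0 ≤ num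
instance (num : Int) : Decidable (Pre_convertToSingle num) := by unfold Pre_convertToSingle; infer_instance
def pvWitness_convertToSingle : Int := (38)

def Spec_convertToSingle (num : Int) (out : Int) : Prop := out = convertToSingle_alt num
instance (num : Int) (out : Int) : Decidable (Spec_convertToSingle num out) := by unfold Spec_convertToSingle; infer_instance

-- ===== CLAIM (what is proved, stated in full; the proofs are below) =====
def Claim_equal_convertToSingle : Prop := ∀ (num : Int), Dom_convertToSingle num → Pre_convertToSingle num → Spec_convertToSingle num (convertToSingle num)

-- ===== LEMMAS AND PROOFS =====

theorem digitSumB_nonneg (n : Int) (h : 0 ≤ n) : 0 ≤ digitSumB n := by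
  induction n using pvIntStrongInd with
  | h n ih =>
    by_cases hlt : n < 10
    · rw [digitSumB_small _ hlt]; omega
    · rw [digitSumB_big _ (by omega)]
      have h10 : PySem.Int.floordiv n 10 = n / 10 :=
        PySem.Int.floordiv_eq_ediv_of_pos (by omega)
      have hm : PySem.Int.mod n 10 = n % 10 :=
        PySem.Int.mod_eq_emod_of_pos (by omega)
      have := ih (PySem.Int.floordiv n 10) (by rw [h10]; omega) (by rw [h10]; omega)
      rw [hm]
      omega

-- A's accumulator loop computes total + (B's direct digit sum), for 0 ≤ num
theorem convertToSingleLoop_eq_digitSumB (num : Int) (h : 0 ≤ num) :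
    ∀ total noOfDigits : Int,
      convertToSingleLoop num total noOfDigits = total + digitSumB num := by
  induction num using pvIntStrongInd with
  | h n ih =>
    intro total noOfDigits
    by_cases h0 : n ≤ 0
    · rw [convertToSingleLoop_nonpos _ _ _ h0, digitSumB_small _ (by omega)]
      omega
    · have h10 : PySem.Int.floordiv n 10 = n / 10 :=
        PySem.Int.floordiv_eq_ediv_of_pos (by omega)
      rw [convertToSingleLoop_pos _ _ _ (by omega),
        ih (PySem.Int.floordiv n 10) (by rw [h10]; omega) (by rw [h10]; omega)]
      by_cases hlt : n < 10
      · have hdiv0 : PySem.Int.floordiv n 10 = 0 := by rw [h10]; omega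
        have hmod : PySem.Int.mod n 10 = n % 10 :=
          PySem.Int.mod_eq_emod_of_pos (by omega)
        rw [hdiv0, digitSumB_small 0 (by omega), digitSumB_small n hlt, hmod]
        omega
      · rw [digitSumB_big n (by omega)]
        ring

-- unfolding of convertSingle, used below
theorem convertToSingle_eq (num : Int) :
    convertToSingle num =
      if 9 < convertToSingleLoop num 0 0 then 1 + convertToSingle (convertToSingleLoop num 0 0)
      else 1 := by
  rw [convertToSingle]

-- the counter accumulates: altLoop num c = c + A's recursive count, for 0 ≤ num
theorem convertToSingleAltLoop_eq (num : Int) (h : 0 ≤ num) : ∀ count : Int,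
    convertToSingleAltLoop num count = count + convertToSingle num := by
  induction num using pvIntStrongInd with
  | h n ih =>
    intro count
    rw [convertToSingleAltLoop.eq_def, convertToSingle_eq,
      convertToSingleLoop_eq_digitSumB n (by omega) 0 0, zero_add]
    by_cases hle : digitSumB n ≤ 9
    · simp [hle, show ¬ (9 < digitSumB n) by omega]
    · have hb := digitSumB_le n
      have h10 : 10 ≤ n := by
        by_contra hc
        rw [digitSumB_small _ (by omega)] at hle
        omega
      have hlt := hb.2 h10
      have hge : 0 ≤ digitSumB n := digitSumB_nonneg n (by omega)
      rw [if_neg hle, if_pos (show 9 < digitSumB n from by omega),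
        ih (digitSumB n) (by omega) (by omega) (count + 1)]
      ring

-- ===== VERDICT (by name: the statement is the Claim_ definition above) =====
theorem convertToSingle_spec : Claim_equal_convertToSingle := by
  intro num _ hpre
  unfold Spec_convertToSingle convertToSingle_alt
  rw [convertToSingleAltLoop_eq num hpre 0]
  omega
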